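-- pv_equiv track=rewrite | github.com/MrBrantCode/unitest_baseline | mut_generate/mist_train_taco/taco_9461/solution.py | find_max_non_negative_subarray
-- ===== SOURCE A (Python) =====
-- def find_max_non_negative_subarray(arr):
--     n = len(arr)
--     if n == 0:
--         return [], -1, -1
--
--     max_sum = -1
--     max_length = 0
--     max_start = 0
--     max_end = 0
--
--     current_sum = 0
--     current_start = 0
--
--     for i in range(n):
--         if arr[i] >= 0:
--             current_sum += arr[i]
--         else:
--             if current_sum > max_sum or (current_sum == max_sum and (i - current_start) > max_length):
--                 max_sum = current_sum
--                 max_length = i - current_start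
--                 max_start = current_start
--                 max_end = i
--             current_sum = 0
--             current_start = i + 1
--
--     # Check the last subarray if it ends at the end of the array
--     if current_sum > max_sum or (current_sum == max_sum and (n - current_start) > max_length):
--         max_sum = current_sum
--         max_length = n - current_start
--         max_start = current_start
--         max_end = n
--
--     max_subarray = arr[max_start:max_end]
--     return max_subarray, max_start, max_end
-- ===== SOURCE B (Python) =====
-- def find_max_non_negative_subarray(arr):
--     n = len(arr)
--     if n == 0:
--         return [], -1, -1
--     # cut positions: indices of negative elements
--     cuts = [i for i, x in enumerate(arr) if x < 0]
--     starts = [0] + [c + 1 for c in cuts]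
--     ends = cuts + [n]
--     s, e = max(zip(starts, ends),
--                key=lambda se: (sum(arr[se[0]:se[1]]), se[1] - se[0]))
--     return arr[s:e], s, e
-- ===== Notes on version B (the rewrite author's own statement) =====
-- stated objective: alternative
-- what changed: Replaces A's single streaming scan with mutable best/current state by a two-phase decomposition: collect the cut positions (indices of negative elements), form the len(cuts)+1 (start,end) segments by zipping shifted cut lists, and pick the winner with max(..., key=(sum, length)), which reproduces A's highest-sum/longest/earliest tie-break.
import Mathlib
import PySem

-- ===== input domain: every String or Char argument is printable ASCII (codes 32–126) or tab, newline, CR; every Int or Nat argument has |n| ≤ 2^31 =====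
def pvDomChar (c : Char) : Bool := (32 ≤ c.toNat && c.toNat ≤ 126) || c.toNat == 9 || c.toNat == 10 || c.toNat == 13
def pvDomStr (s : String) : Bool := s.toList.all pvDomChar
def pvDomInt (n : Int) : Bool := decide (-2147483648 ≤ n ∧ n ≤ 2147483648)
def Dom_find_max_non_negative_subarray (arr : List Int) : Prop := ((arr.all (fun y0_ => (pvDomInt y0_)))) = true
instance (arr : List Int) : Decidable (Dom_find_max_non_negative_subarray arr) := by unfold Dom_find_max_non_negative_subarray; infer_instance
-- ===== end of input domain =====

-- B replaces A's streaming best/current scan by a two-phase decomposition (cut positions -> zip into segments -> max by (sum, length)); objective: alternative, same O(n) cost.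


-- ===== PORT A =====
def find_max_non_negative_subarray (arr : List Int) : List Int × Int × Int :=
  let n : Int := arr.length
  if n = 0 then ([], -1, -1)
  else
    -- state: (max_sum, max_length, max_start, max_end, current_sum, current_start)
    let st := (PySem.List.pyRange 0 n).foldl
      (fun (s : Int × Int × Int × Int × Int × Int) i =>
        let (ms, ml, mst, me, cs, cst) := s
        let x := PySem.List.pyGetD arr i 0
        if x ≥ 0 then (ms, ml, mst, me, cs + x, cst)
        else
          if cs > ms ∨ (cs = ms ∧ i - cst > ml) then (cs, i - cst, cst, i, 0, i + 1)
          else (ms, ml, mst, me, 0, i + 1))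
      (-1, 0, 0, 0, 0, 0)
    let (ms, ml, mst, me, cs, cst) := st
    let (mst, me) :=
      if cs > ms ∨ (cs = ms ∧ n - cst > ml) then (cst, n) else (mst, me)
    (PySem.List.slice arr (some mst) (some me), mst, me)

-- ===== PORT B =====
def find_max_non_negative_subarray_alt (arr : List Int) : List Int × Int × Int :=
  let n : Int := arr.length
  if n = 0 then ([], -1, -1)
  else
    let cuts := (PySem.List.enumerate arr).filterMap
      (fun p => if p.2 < 0 then some p.1 else none)
    let starts := 0 :: cuts.map (· + 1)
    let ends := cuts ++ [n]
    let best := PySem.List.maxD (starts.zip ends)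
      (fun se => toLex ((PySem.List.slice arr (some se.1) (some se.2)).sum, se.2 - se.1))
      (0, 0)
    (PySem.List.slice arr (some best.1) (some best.2), best.1, best.2)

-- ===== PRECONDITION & SPEC =====
def Spec_find_max_non_negative_subarray (arr : List Int) (out : List Int × Int × Int) : Prop := out = find_max_non_negative_subarray_alt arr
instance (arr : List Int) (out : List Int × Int × Int) : Decidable (Spec_find_max_non_negative_subarray arr out) := by unfold Spec_find_max_non_negative_subarray; infer_instance

-- ===== CLAIM (what is proved, stated in full; the proofs are below) =====
def Claim_equal_find_max_non_negative_subarray : Prop := ∀ (arr : List Int), Dom_find_max_non_negative_subarray arr → Spec_find_max_non_negative_subarray arr (find_max_non_negative_subarray arr)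

-- ===== LEMMAS AND PROOFS =====

-- A's loop body, abstracted over the (index, element) pair.
def pvStepA (s : Int × Int × Int × Int × Int × Int) (p : Int × Int) :
    Int × Int × Int × Int × Int × Int :=
  let (ms, ml, mst, me, cs, cst) := s
  if p.2 ≥ 0 then (ms, ml, mst, me, cs + p.2, cst)
  else
    if cs > ms ∨ (cs = ms ∧ p.1 - cst > ml) then (cs, p.1 - cst, cst, p.1, 0, p.1 + 1)
    else (ms, ml, mst, me, 0, p.1 + 1)

-- B's max?-fold body (Python max keeps the first maximal item).
def pvMaxStep (arr : List Int) (acc : Option (Int × Int)) (seg : Int × Int) :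
    Option (Int × Int) :=
  match acc with
  | none => some seg
  | some m =>
    if (toLex ((PySem.List.slice arr (some m.1) (some m.2)).sum, m.2 - m.1) :
          Lex (Int × Int)) <
        toLex ((PySem.List.slice arr (some seg.1) (some seg.2)).sum, seg.2 - seg.1)
    then some seg else some m

-- the (start, end) segments of tl (= arr from index i on), current open segment starting at cst
def pvSegs (tl : List Int) (i cst : Nat) : List (Int × Int) :=
  match tl with
  | [] => [((cst : Int), (i : Int))]
  | x :: xs => if x < 0 then ((cst : Int), (i : Int)) :: pvSegs xs (i + 1) (i + 1)
               else pvSegs xs (i + 1) cst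

-- A's stored best, reconstructed from the best segment seen so far
def pvStOf (arr : List Int) (acc : Option (Int × Int)) : Int × Int × Int × Int :=
  match acc with
  | none => (-1, 0, 0, 0)
  | some (s, e) => ((PySem.List.slice arr (some s) (some e)).sum, e - s, s, e)

theorem pv_enum_cons {α : Type} (x : α) (xs : List α) (s : Int) :
    PySem.List.enumerate (x :: xs) s = (s, x) :: PySem.List.enumerate xs (s + 1) := rfl

-- fold over pyRange with indexing = fold over the enumerated suffix
theorem pv_rangefold {β : Type} (arr : List Int) (f : β → Int × Int → β) :
    ∀ (tl : List Int) (i : Nat) (init : β), arr.drop i = tl → i ≤ arr.length →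
    (PySem.List.pyRange (i : Int) (arr.length : Int)).foldl
        (fun s j => f s (j, PySem.List.pyGetD arr j 0)) init
      = (PySem.List.enumerate tl (i : Int)).foldl f init := by
  intro tl
  induction tl with
  | nil =>
    intro i init hdrop hle
    have hlen : arr.length ≤ i := by
      have := congrArg List.length hdrop
      simp [List.length_drop] at this
      omega
    rw [PySem.List.pyRange_one_eq_nil (by exact_mod_cast hlen)]
    rfl
  | cons x xs ih =>
    intro i init hdrop hle
    have hi : i < arr.length := by
      have := congrArg List.length hdrop
      simp [List.length_drop] at this
      omega
    have hcons : arr.drop i = arr[i] :: arr.drop (i + 1) := List.drop_eq_getElem_cons hi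
    rw [hdrop] at hcons
    have hx : arr[i] = x := (List.cons.injEq _ _ _ _ ▸ hcons).1.symm
    have hxs : arr.drop (i + 1) = xs := ((List.cons.injEq _ _ _ _ ▸ hcons).2).symm
    rw [PySem.List.pyRange_one_cons (by exact_mod_cast hi), pv_enum_cons]
    simp only [List.foldl_cons]
    rw [PySem.List.pyGetD_eq_getElem arr 0 (by positivity) (by exact_mod_cast hi)]
    simp only [Int.toNat_natCast, hx]
    have := ih (i + 1) (f init ((i : Int), x)) hxs (by omega)
    push_cast at this ⊢
    exact this

theorem pv_zipsegs (tl : List Int) : ∀ (i cst : Nat),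
    (((cst : Int) :: ((PySem.List.enumerate tl (i : Int)).filterMap
        (fun p => if p.2 < 0 then some p.1 else none)).map (· + 1)).zip
      (((PySem.List.enumerate tl (i : Int)).filterMap
        (fun p => if p.2 < 0 then some p.1 else none)) ++ [((i + tl.length : Nat) : Int)]))
      = pvSegs tl i cst := by
  induction tl with
  | nil => intro i cst; simp [pvSegs, PySem.List.enumerate]
  | cons x xs ih =>
    intro i cst
    rw [pv_enum_cons]
    by_cases hx : x < 0
    · simp only [pvSegs, hx, if_true, List.filterMap_cons, List.map_cons,
        List.cons_append, List.zip_cons_cons, List.length_cons]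
      have := ih (i + 1) (i + 1)
      push_cast at this ⊢
      ring_nf at this ⊢
      rw [this]
    · simp only [pvSegs, hx, if_false, List.filterMap_cons, List.length_cons]
      have := ih (i + 1) cst
      push_cast at this ⊢
      ring_nf at this ⊢
      rw [this]

theorem pv_slice_empty (arr : List Int) (a : Nat) :
    PySem.List.slice arr (some (a : Int)) (some (a : Int)) = [] := by
  rw [PySem.List.slice_natCast]; simp

theorem pv_slice_succ (arr : List Int) (cst i : Nat) (x : Int) (xs : List Int)
    (hcst : cst ≤ i) (hdrop : arr.drop i = x :: xs) :
    PySem.List.slice arr (some (cst : Int)) (some ((i : Int) + 1))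
      = PySem.List.slice arr (some (cst : Int)) (some (i : Int)) ++ [x] := by
  have h1 : ((i : Int) + 1) = ((i + 1 : Nat) : Int) := by push_cast; ring
  rw [h1, PySem.List.slice_natCast, PySem.List.slice_natCast]
  have hsub : i + 1 - cst = (i - cst) + 1 := by omega
  rw [hsub, List.take_add_one]
  congr 1
  have hgx : arr[i]? = some x := by
    have := List.getElem?_drop (xs := arr) (i := i) (j := 0)
    rw [hdrop] at this
    simpa using this.symm
  have h2 : (arr.drop cst)[i - cst]? = arr[i]? := by
    rw [List.getElem?_drop]
    congr 1
    omega
  rw [h2, hgx]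
  rfl

theorem pv_main (arr : List Int) :
    ∀ (tl : List Int) (i cst : Nat) (acc : Option (Int × Int)),
      arr.drop i = tl → cst ≤ i → i ≤ arr.length →
      (∀ y ∈ PySem.List.slice arr (some (cst : Int)) (some (i : Int)), 0 ≤ y) →
      ((fun (st : Int × Int × Int × Int × Int × Int) =>
          if st.2.2.2.2.1 > st.1 ∨ (st.2.2.2.2.1 = st.1 ∧ (arr.length : Int) - st.2.2.2.2.2 > st.2.1)
          then (st.2.2.2.2.2, (arr.length : Int)) else (st.2.2.1, st.2.2.2.1))
        ((PySem.List.enumerate tl (i : Int)).foldl pvStepA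
          ((pvStOf arr acc).1, (pvStOf arr acc).2.1, (pvStOf arr acc).2.2.1, (pvStOf arr acc).2.2.2,
           (PySem.List.slice arr (some (cst : Int)) (some (i : Int))).sum, (cst : Int))))
      = ((pvSegs tl i cst).foldl (pvMaxStep arr) acc).getD (0, 0) := by
  intro tl
  induction tl with
  | nil =>
    intro i cst acc hdrop hcst hlen hnn
    have hin : i = arr.length := by
      have := congrArg List.length hdrop
      simp [List.length_drop] at this
      omega
    subst hin
    have hcs : 0 ≤ (PySem.List.slice arr (some (cst : Int)) (some (arr.length : Int))).sum :=
      List.sum_nonneg hnn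
    rcases acc with _ | ⟨s, e⟩
    · simp only [pvSegs, pvStOf, pvMaxStep, List.foldl_cons, List.foldl_nil]
      rw [show PySem.List.enumerate ([] : List Int) (arr.length : Int) = [] from rfl]
      simp only [List.foldl_nil]
      rw [if_pos (Or.inl (by omega))]
      rfl
    · simp only [pvSegs, pvStOf, pvMaxStep, List.foldl_cons, List.foldl_nil]
      rw [show PySem.List.enumerate ([] : List Int) (arr.length : Int) = [] from rfl]
      simp only [List.foldl_nil]
      by_cases hlt :
        (toLex ((PySem.List.slice arr (some s) (some e)).sum, e - s) : Lex (Int × Int)) <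
          toLex ((PySem.List.slice arr (some (cst : Int)) (some (arr.length : Int))).sum,
                 (arr.length : Int) - (cst : Int))
      · have hc := (Prod.Lex.toLex_lt_toLex).1 hlt
        simp at hc
        rw [if_pos hlt, if_pos (by omega)]
        rfl
      · have hc := fun h => hlt ((Prod.Lex.toLex_lt_toLex).2 h)
        simp at hc
        rw [if_neg hlt, if_neg (by omega)]
        rfl
  | cons x xs ih =>
    intro i cst acc hdrop hcst hlen hnn
    have hi : i < arr.length := by
      have := congrArg List.length hdrop
      simp [List.length_drop] at this
      omega
    have hcons : arr.drop i = arr[i] :: arr.drop (i + 1) := List.drop_eq_getElem_cons hi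
    rw [hdrop] at hcons
    have hxs : arr.drop (i + 1) = xs := ((List.cons.injEq _ _ _ _ ▸ hcons).2).symm
    have hslice := pv_slice_succ arr cst i x xs hcst hdrop
    have hcast : ((i : Int) + 1) = ((i + 1 : Nat) : Int) := by push_cast; ring
    rw [pv_enum_cons, List.foldl_cons]
    by_cases hx0 : x < 0
    · -- x negative: close the open segment
      have hcs : 0 ≤ (PySem.List.slice arr (some (cst : Int)) (some (i : Int))).sum :=
        List.sum_nonneg hnn
      have hnn' : ∀ y ∈ PySem.List.slice arr (some ((i + 1 : Nat) : Int)) (some ((i + 1 : Nat) : Int)), 0 ≤ y := by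
        rw [pv_slice_empty]; intro y hy; cases hy
      have hseg : pvSegs (x :: xs) i cst = ((cst : Int), (i : Int)) :: pvSegs xs (i + 1) (i + 1) := by
        simp [pvSegs, hx0]
      rw [hseg, List.foldl_cons]
      have hstep : pvStepA
          ((pvStOf arr acc).1, (pvStOf arr acc).2.1, (pvStOf arr acc).2.2.1, (pvStOf arr acc).2.2.2,
           (PySem.List.slice arr (some (cst : Int)) (some (i : Int))).sum, (cst : Int)) ((i : Int), x)
          = ((pvStOf arr (pvMaxStep arr acc ((cst : Int), (i : Int)))).1,
             (pvStOf arr (pvMaxStep arr acc ((cst : Int), (i : Int)))).2.1,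
             (pvStOf arr (pvMaxStep arr acc ((cst : Int), (i : Int)))).2.2.1,
             (pvStOf arr (pvMaxStep arr acc ((cst : Int), (i : Int)))).2.2.2,
             (PySem.List.slice arr (some ((i + 1 : Nat) : Int)) (some ((i + 1 : Nat) : Int))).sum,
             ((i + 1 : Nat) : Int)) := by
        rw [pv_slice_empty]
        rcases acc with _ | ⟨s, e⟩
        · simp only [pvStOf, pvMaxStep, pvStepA]
          rw [if_neg (by omega), if_pos (Or.inl (by omega))]
          simp only [List.sum_nil]
          push_cast
          rfl
        · simp only [pvStOf, pvMaxStep, pvStepA]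
          rw [if_neg (by omega)]
          by_cases hlt :
            (toLex ((PySem.List.slice arr (some s) (some e)).sum, e - s) : Lex (Int × Int)) <
              toLex ((PySem.List.slice arr (some (cst : Int)) (some (i : Int))).sum,
                     (i : Int) - (cst : Int))
          · have hc := (Prod.Lex.toLex_lt_toLex).1 hlt
            simp at hc
            rw [if_pos hlt, if_pos (by omega)]
            simp only [List.sum_nil]
            push_cast
            rfl
          · have hc := fun h => hlt ((Prod.Lex.toLex_lt_toLex).2 h)
            simp at hc
            rw [if_neg hlt, if_neg (by omega)]
            simp only [List.sum_nil]
            push_cast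
            rfl
      rw [hstep]
      have := ih (i + 1) (i + 1) (pvMaxStep arr acc ((cst : Int), (i : Int))) hxs
        (by omega) (by omega) hnn'
      push_cast at this ⊢
      exact this
    · -- x nonnegative: extend the open segment
      have hx0' : x ≥ 0 := by omega
      have hnn' : ∀ y ∈ PySem.List.slice arr (some (cst : Int)) (some ((i + 1 : Nat) : Int)), 0 ≤ y := by
        rw [← hcast, hslice]
        intro y hy
        rcases List.mem_append.1 hy with h | h
        · exact hnn y h
        · simp at h; omega
      have hseg : pvSegs (x :: xs) i cst = pvSegs xs (i + 1) cst := by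
        simp [pvSegs, hx0]
      rw [hseg]
      have hstep : pvStepA
          ((pvStOf arr acc).1, (pvStOf arr acc).2.1, (pvStOf arr acc).2.2.1, (pvStOf arr acc).2.2.2,
           (PySem.List.slice arr (some (cst : Int)) (some (i : Int))).sum, (cst : Int)) ((i : Int), x)
          = ((pvStOf arr acc).1, (pvStOf arr acc).2.1, (pvStOf arr acc).2.2.1, (pvStOf arr acc).2.2.2,
             (PySem.List.slice arr (some (cst : Int)) (some ((i + 1 : Nat) : Int))).sum, (cst : Int)) := by
        simp only [pvStepA]
        rw [if_pos (by simpa using hx0')]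
        rw [← hcast, hslice]
        simp [List.sum_append]
      rw [hstep]
      have := ih (i + 1) cst acc hxs (by omega) (by omega) hnn'
      push_cast at this ⊢
      exact this

-- ===== VERDICT (by name: the statement is the Claim_ definition above) =====
theorem find_max_non_negative_subarray_spec : Claim_equal_find_max_non_negative_subarray := by
  intro arr _
  unfold Spec_find_max_non_negative_subarray
  by_cases h : arr.length = 0
  · have he : arr = [] := List.eq_nil_of_length_eq_zero h
    subst he
    rfl
  · have hne : ((arr.length : Int)) ≠ 0 := by exact_mod_cast h
    unfold find_max_non_negative_subarray find_max_non_negative_subarray_alt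
    simp only [if_neg hne]
    -- A's loop body is pvStepA on (index, element) pairs
    have hfunA : (fun (s : Int × Int × Int × Int × Int × Int) (i : Int) =>
        let (ms, ml, mst, me, cs, cst) := s
        let x := PySem.List.pyGetD arr i 0
        if x ≥ 0 then (ms, ml, mst, me, cs + x, cst)
        else
          if cs > ms ∨ (cs = ms ∧ i - cst > ml) then (cs, i - cst, cst, i, 0, i + 1)
          else (ms, ml, mst, me, 0, i + 1))
        = (fun s j => pvStepA s (j, PySem.List.pyGetD arr j 0)) := rfl
    have hA := pv_rangefold arr pvStepA arr 0 ((-1 : Int), (0 : Int), (0 : Int), (0 : Int), (0 : Int), (0 : Int)) (by simp) (by omega)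
    push_cast at hA
    rw [hfunA, hA]
    -- B's zipped segment list is pvSegs
    have hZ := pv_zipsegs arr 0 0
    push_cast at hZ
    rw [zero_add] at hZ
    -- B's max-fold body is pvMaxStep
    have hfunB : PySem.List.max? (pvSegs arr 0 0)
        (fun se => (toLex ((PySem.List.slice arr (some se.1) (some se.2)).sum, se.2 - se.1) : Lex (Int × Int)))
        = (pvSegs arr 0 0).foldl (pvMaxStep arr) none := by
      unfold PySem.List.max?
      congr 1
      funext acc x
      rcases acc with _ | m <;> rfl
    have h00 : PySem.List.slice arr (some (0 : Int)) (some (0 : Int)) = [] := by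
      simpa using pv_slice_empty arr 0
    have hm := pv_main arr arr 0 0 none rfl (Nat.le_refl 0) (by omega)
      (by intro y hy; rw [show ((0 : Nat) : Int) = (0 : Int) from rfl, h00] at hy; cases hy)
    push_cast at hm
    rw [h00] at hm
    simp only [pvStOf, List.sum_nil] at hm
    simp only [PySem.List.maxD]
    rw [hZ]
    rw [hfunB]
    rw [← hm]
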